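-- pv_equiv track=rewrite | github.com/Ace1928/eidosian_forge | archive_forge/code/func_convert_version_to_str.py | convert_version_to_str
-- ===== SOURCE A (Python) =====
-- def convert_version_to_str(version_int):
--     """Convert a version integer to a string with dots.
--
--     .. versionadded:: 2.0
--     """
--     version_numbers = []
--     factor = 1000
--     while version_int != 0:
--         version_number = version_int - version_int // factor * factor
--         version_numbers.insert(0, str(version_number))
--         version_int = version_int // factor
--     return '.'.join(map(str, version_numbers))
-- ===== SOURCE B (Python) =====
-- def convert_version_to_str(version_int):
--     """Convert a version integer to a string with dots.
--
--     .. versionadded:: 2.0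
--     """
--     if version_int == 0:
--         return ''
--     head = version_int // 1000
--     if head == 0:
--         return str(version_int)
--     return convert_version_to_str(head) + '.' + str(version_int % 1000)
-- ===== Notes on version B (the rewrite author's own statement) =====
-- stated objective: simpler
-- what changed: Replaces A's while-loop that prepends each base-1000 component to a list and joins it by a direct recursion on the high-order part of version_int that concatenates the dotted string top-down, with no list accumulator.
import Mathlib
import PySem

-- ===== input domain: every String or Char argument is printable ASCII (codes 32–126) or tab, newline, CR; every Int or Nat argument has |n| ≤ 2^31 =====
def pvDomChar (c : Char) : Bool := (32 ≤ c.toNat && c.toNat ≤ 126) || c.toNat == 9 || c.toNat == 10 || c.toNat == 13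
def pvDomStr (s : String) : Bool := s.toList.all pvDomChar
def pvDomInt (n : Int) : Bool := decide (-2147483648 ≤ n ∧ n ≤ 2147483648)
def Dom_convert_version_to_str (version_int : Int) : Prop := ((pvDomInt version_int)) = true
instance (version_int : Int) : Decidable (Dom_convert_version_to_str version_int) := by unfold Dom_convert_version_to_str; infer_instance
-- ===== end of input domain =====

-- B replaces A's while-loop with insert(0, …) accumulator by a recursion from the
-- high-order component down (objective: simpler); return values agree on all inputs
-- where A returns (0 ≤ version_int; A loops forever on negative input).

-- ===== PORT A =====
-- A's while-loop, step for step; the fuel argument only makes the recursion total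
-- (it is large enough to never run out on 0 ≤ version_int, where the loop terminates).
def pvLoopA : Nat → Int → List String → List String
  | 0, _, acc => acc
  | f + 1, v, acc =>
    if v ≠ 0 then
      let d := v - PySem.Int.floordiv v 1000 * 1000   -- version_number
      pvLoopA f (PySem.Int.floordiv v 1000) (PySem.Int.toStr d :: acc)  -- insert(0, str(d)); v = v // 1000
    else acc

def convert_version_to_str (version_int : Int) : String :=
  PySem.Str.join "." (pvLoopA (version_int.toNat + 1) version_int [])

-- ===== PORT B =====
-- B's recursion; the fuel argument only makes it total (never exhausted for 0 ≤ version_int).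
def pvRecB : Nat → Int → String
  | 0, _ => ""
  | f + 1, v =>
    if v = 0 then ""
    else
      let head := PySem.Int.floordiv v 1000
      if head = 0 then PySem.Int.toStr v
      else pvRecB f head ++ "." ++ PySem.Int.toStr (PySem.Int.mod v 1000)

def convert_version_to_str_alt (version_int : Int) : String :=
  pvRecB (version_int.toNat + 1) version_int

-- ===== PRECONDITION & SPEC =====
-- A's while-loop never reaches 0 from a negative version_int (−1 // 1000 = −1), so A
-- loops forever there; Pre_ admits exactly the inputs on which the Python A returns.
def Pre_convert_version_to_str (version_int : Int) : Prop := 0 ≤ version_int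
instance (version_int : Int) : Decidable (Pre_convert_version_to_str version_int) := by
  unfold Pre_convert_version_to_str; infer_instance
def pvWitness_convert_version_to_str : Int := (1234567)
def Spec_convert_version_to_str (version_int : Int) (out : String) : Prop := out = convert_version_to_str_alt version_int
instance (version_int : Int) (out : String) : Decidable (Spec_convert_version_to_str version_int out) := by unfold Spec_convert_version_to_str; infer_instance

-- ===== CLAIM (what is proved, stated in full; the proofs are below) =====
def Claim_equal_convert_version_to_str : Prop := ∀ (version_int : Int), Dom_convert_version_to_str version_int → Pre_convert_version_to_str version_int → Spec_convert_version_to_str version_int (convert_version_to_str version_int)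

-- ===== LEMMAS AND PROOFS =====

-- A's loop only prepends to the accumulator
theorem pvLoopA_acc (f : Nat) : ∀ (v : Int) (acc : List String),
    pvLoopA f v acc = pvLoopA f v [] ++ acc := by
  induction f with
  | zero => intro v acc; simp [pvLoopA]
  | succ f ih =>
    intro v acc
    by_cases h : v = 0
    · simp [pvLoopA, h]
    · simp only [pvLoopA, if_pos h, ne_eq]
      rw [ih _ (_ :: acc), ih _ [_]]
      simp

theorem pv_chars_join_append_singleton (sep d : List Char) :
    ∀ (l : List (List Char)), l ≠ [] →
    PySem.Chars.join sep (l ++ [d]) = PySem.Chars.join sep l ++ sep ++ d := by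
  intro l
  induction l with
  | nil => intro h; exact absurd rfl h
  | cons x xs ih =>
    intro _
    cases xs with
    | nil => simp [PySem.Chars.join_cons_cons, PySem.Chars.join_singleton]
    | cons y ys =>
      simp only [List.cons_append, PySem.Chars.join_cons_cons]
      simp only [List.cons_append] at ih
      rw [ih (by simp)]
      simp [List.append_assoc]

theorem pv_join_append_singleton (l : List String) (s : String) (h : l ≠ []) :
    PySem.Str.join "." (l ++ [s]) = PySem.Str.join "." l ++ "." ++ s := by
  apply String.toList_inj.mp
  simp only [PySem.Str.toList_join, String.toList_append, List.map_append, List.map]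
  exact pv_chars_join_append_singleton _ _ _ (by simpa using h)

theorem pv_head_lt (v : Int) (h0 : 0 < v) :
    (PySem.Int.floordiv v 1000).toNat < v.toNat := by
  rw [PySem.Int.floordiv_eq_ediv_of_pos (by omega)]
  omega

-- main induction: with enough fuel, the joined loop output equals B's recursion
theorem pv_main (f : Nat) : ∀ (v : Int), 0 ≤ v → v.toNat < f →
    PySem.Str.join "." (pvLoopA f v []) = pvRecB f v := by
  induction f with
  | zero => intro v _ hf; omega
  | succ f ih =>
    intro v hv hf
    by_cases h : v = 0
    · subst h
      apply String.toList_inj.mp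
      simp [pvLoopA, pvRecB, PySem.Str.toList_join, PySem.Chars.join_nil]
    · have hpos : 0 < v := lt_of_le_of_ne hv (Ne.symm h)
      have hmod : v - PySem.Int.floordiv v 1000 * 1000 = PySem.Int.mod v 1000 := by
        have := PySem.Int.floordiv_mul_add_mod v 1000; omega
      simp only [pvLoopA, pvRecB, ne_eq, h, not_false_eq_true, if_pos]
      rw [pvLoopA_acc, hmod]
      by_cases hh : PySem.Int.floordiv v 1000 = 0
      · rw [hh, if_pos rfl]
        have hz : ∀ g, pvLoopA g (0:Int) [] = [] := by
          intro g; cases g <;> simp [pvLoopA]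
        rw [hz]
        have hv' : PySem.Int.mod v 1000 = v := by
          have := PySem.Int.floordiv_mul_add_mod v 1000; omega
        rw [hv']
        apply String.toList_inj.mp
        simp [PySem.Str.toList_join, PySem.Chars.join_singleton]
      · rw [if_neg hh]
        have hheadnn : 0 ≤ PySem.Int.floordiv v 1000 := by
          rw [PySem.Int.floordiv_eq_ediv_of_pos (by omega)]
          exact Int.ediv_nonneg hv (by omega)
        have hlt := pv_head_lt v hpos
        have hf' : (PySem.Int.floordiv v 1000).toNat < f := by omega
        have hne : pvLoopA f (PySem.Int.floordiv v 1000) [] ≠ [] := by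
          cases f with
          | zero => omega
          | succ g =>
            simp only [pvLoopA, ne_eq, hh, not_false_eq_true, if_pos]
            rw [pvLoopA_acc]
            simp
        rw [pv_join_append_singleton _ _ hne, ih _ hheadnn hf']
        simp

-- ===== VERDICT (by name: the statement is the Claim_ definition above) =====
theorem convert_version_to_str_spec : Claim_equal_convert_version_to_str := by
  intro v _ hpre
  unfold Spec_convert_version_to_str convert_version_to_str convert_version_to_str_alt
  exact pv_main _ v hpre (by omega)
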